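-- pv_equiv track=rewrite | github.com/kavanaghpatrick/london-rental-scraper | cli/registry.py | is_target_postcode
-- ===== SOURCE A (Python) =====
-- TARGET_POSTCODES = [
--     'SW1', 'SW3', 'SW5', 'SW7', 'SW10',  # Chelsea, South Ken, Knightsbridge
--     'W8', 'W11', 'W2', 'W1',  # Kensington, Notting Hill, Mayfair
--     'NW1', 'NW3', 'NW8',  # St John's Wood, Hampstead
--     'SW6', 'SW11',  # Fulham
-- ]
--
-- def is_target_postcode(postcode: str) -> bool:
--     """Check if postcode is in target area."""
--     if not postcode:
--         return True  # Include if unknown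
--     district = postcode.upper().split()[0] if ' ' in postcode else postcode.upper()
--     for target in TARGET_POSTCODES:
--         if district.startswith(target):
--             return True
--     return False
-- ===== SOURCE B (Python) =====
-- TARGET_POSTCODES = [
--     'SW1', 'SW3', 'SW5', 'SW7', 'SW10',  # Chelsea, South Ken, Knightsbridge
--     'W8', 'W11', 'W2', 'W1',  # Kensington, Notting Hill, Mayfair
--     'NW1', 'NW3', 'NW8',  # St John's Wood, Hampstead
--     'SW6', 'SW11',  # Fulham
-- ]
--
-- TARGET_SET = set(TARGET_POSTCODES)
-- MAX_TARGET_LEN = max(len(t) for t in TARGET_POSTCODES)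
--
-- def is_target_postcode(postcode: str) -> bool:
--     """Check if postcode is in target area."""
--     if not postcode:
--         return True  # Include if unknown
--     district = postcode.upper().split()[0] if ' ' in postcode else postcode.upper()
--     for i in range(1, min(len(district), MAX_TARGET_LEN) + 1):
--         if district[:i] in TARGET_SET:
--             return True
--     return False
-- ===== Notes on version B (the rewrite author's own statement) =====
-- stated objective: alternative
-- what changed: Instead of scanning the fixed target list and testing startswith for each, B iterates over the prefixes of the district (lengths 1 up to the maximum target length) and tests each against a precomputed set of targets, reversing the traversal direction.
-- outside the precondition, e.g. on is_target_postcode(' '): A raises IndexError, B raises IndexError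
import Mathlib
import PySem

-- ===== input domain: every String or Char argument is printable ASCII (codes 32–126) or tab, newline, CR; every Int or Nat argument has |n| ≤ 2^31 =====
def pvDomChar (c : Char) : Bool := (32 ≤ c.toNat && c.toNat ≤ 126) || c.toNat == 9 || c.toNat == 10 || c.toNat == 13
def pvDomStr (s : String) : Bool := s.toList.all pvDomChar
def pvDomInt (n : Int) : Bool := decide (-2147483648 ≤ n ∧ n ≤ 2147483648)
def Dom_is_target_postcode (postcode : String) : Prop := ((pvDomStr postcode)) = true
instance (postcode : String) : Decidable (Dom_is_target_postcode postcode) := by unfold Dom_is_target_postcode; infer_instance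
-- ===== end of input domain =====

-- B re-implements the check by scanning the prefixes of the district against a set of the
-- targets instead of scanning the target list with startswith; equal return values are proved
-- on Pre_ (A raises IndexError on whitespace-only strings containing ' '; B raises there too).

-- ===== PORT A =====
def TARGET_POSTCODES : List String :=
  ["SW1", "SW3", "SW5", "SW7", "SW10",
   "W8", "W11", "W2", "W1",
   "NW1", "NW3", "NW8",
   "SW6", "SW11"]

def is_target_postcode (postcode : String) : Bool :=
  if postcode = "" then true
  else
    let district? : Option String :=
      if PySem.Str.isIn " " postcode then
        PySem.List.pyGet? (PySem.Str.split₀ (PySem.Str.upper postcode)) 0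
      else some (PySem.Str.upper postcode)
    match district? with
    | none => false  -- IndexError in Python; excluded by Pre_
    | some district => TARGET_POSTCODES.any (fun target => PySem.Str.startswith district target)

-- ===== PORT B =====
def TARGET_SET : PySem.Set String := PySem.Set.ofList TARGET_POSTCODES

def MAX_TARGET_LEN : Int := ((TARGET_POSTCODES.map (fun t => PySem.Str.len t)).max?).getD 0

def is_target_postcode_alt (postcode : String) : Bool :=
  if postcode = "" then true
  else
    let district? : Option String :=
      if PySem.Str.isIn " " postcode then
        PySem.List.pyGet? (PySem.Str.split₀ (PySem.Str.upper postcode)) 0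
      else some (PySem.Str.upper postcode)
    match district? with
    | none => false  -- IndexError in Python; excluded by Pre_
    | some district =>
      (PySem.List.pyRange 1 (min (PySem.Str.len district) MAX_TARGET_LEN + 1)).any
        (fun i => PySem.Set.contains TARGET_SET (PySem.Str.slice district none (some i)))

-- ===== PRECONDITION & SPEC =====
-- Pre_ excludes exactly the inputs on which A raises IndexError: strings that contain ' '
-- but whose split() is empty (whitespace-only strings containing a space). B raises there too.
def Pre_is_target_postcode (postcode : String) : Prop :=
  PySem.Str.isIn " " postcode = true → PySem.Str.split₀ (PySem.Str.upper postcode) ≠ []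
instance (postcode : String) : Decidable (Pre_is_target_postcode postcode) := by
  unfold Pre_is_target_postcode; infer_instance
def pvWitness_is_target_postcode : String := "SW1A 1AA"

def Spec_is_target_postcode (postcode : String) (out : Bool) : Prop := out = is_target_postcode_alt postcode
instance (postcode : String) (out : Bool) : Decidable (Spec_is_target_postcode postcode out) := by unfold Spec_is_target_postcode; infer_instance

-- ===== CLAIM (what is proved, stated in full; the proofs are below) =====
def Claim_equal_is_target_postcode : Prop := ∀ (postcode : String), Dom_is_target_postcode postcode → Pre_is_target_postcode postcode → Spec_is_target_postcode postcode (is_target_postcode postcode)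

-- ===== LEMMAS AND PROOFS =====

-- every target has between 1 and MAX_TARGET_LEN characters
lemma targets_nonempty : ∀ t ∈ TARGET_POSTCODES, 1 ≤ t.toList.length := by decide

lemma targets_short : ∀ t ∈ TARGET_POSTCODES, (t.toList.length : Int) ≤ MAX_TARGET_LEN := by decide

-- the targets are pairwise distinct, so the set built from them is the list itself
lemma target_set_eq : TARGET_SET = TARGET_POSTCODES := by decide

-- the heart of the equivalence: for any district string, "some target is a prefix"
-- (A's loop over targets) equals "some prefix is a target" (B's loop over prefix lengths)
lemma any_startswith_eq_any_prefix (d : String) :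
    TARGET_POSTCODES.any (fun target => PySem.Str.startswith d target)
      = (PySem.List.pyRange 1 (min (PySem.Str.len d) MAX_TARGET_LEN + 1)).any
          (fun i => PySem.Set.contains TARGET_SET (PySem.Str.slice d none (some i))) := by
  rw [target_set_eq]
  apply Bool.eq_iff_iff.mpr
  simp only [List.any_eq_true, PySem.List.mem_pyRange_one, PySem.Set.contains,
    List.contains_eq_mem, decide_eq_true_eq]
  constructor
  · rintro ⟨t, ht, hpre⟩
    have hpre' : t.toList <+: d.toList := by
      simpa [PySem.Str.startswith, PySem.Chars.startswith, List.isPrefixOf_iff_prefix] using hpre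
    refine ⟨(t.toList.length : Int), ⟨?_, ?_⟩, ?_⟩
    · exact_mod_cast targets_nonempty t ht
    · have h1 := hpre'.length_le
      have h2 := targets_short t ht
      rw [PySem.Str.len_eq]
      omega
    · have hs : (PySem.Str.slice d none (some (t.toList.length : Int))).toList = t.toList := by
        rw [PySem.Str.toList_slice]
        show PySem.List.slice d.toList none (some (t.toList.length : Int)) = t.toList
        rw [PySem.List.slice_to_natCast]
        exact List.prefix_iff_eq_take.mp hpre' ▸ rfl
      rwa [String.toList_inj.mp hs]
  · rintro ⟨i, ⟨h1, _⟩, hmem⟩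
    refine ⟨PySem.Str.slice d none (some i), hmem, ?_⟩
    have : (PySem.Str.slice d none (some i)).toList <+: d.toList := by
      rw [PySem.Str.toList_slice]
      show PySem.List.slice d.toList none (some i) <+: d.toList
      rw [PySem.List.slice_to d.toList (by omega)]
      exact List.take_prefix _ _
    simpa [PySem.Str.startswith, PySem.Chars.startswith, List.isPrefixOf_iff_prefix] using this

-- ===== VERDICT (by name: the statement is the Claim_ definition above) =====
theorem is_target_postcode_spec : Claim_equal_is_target_postcode := by
  intro postcode _ hpre
  unfold Spec_is_target_postcode is_target_postcode is_target_postcode_alt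
  by_cases he : postcode = ""
  · simp [he]
  · simp only [if_neg he]
    by_cases hsp : PySem.Str.isIn " " postcode = true
    · simp only [if_pos hsp]
      cases hg : PySem.List.pyGet? (PySem.Str.split₀ (PySem.Str.upper postcode)) 0 with
      | none =>
        cases hl : PySem.Str.split₀ (PySem.Str.upper postcode) with
        | nil => exact absurd hl (hpre hsp)
        | cons a l => rw [hl] at hg
      | some district => exact any_startswith_eq_any_prefix district
    · simp only [if_neg hsp]
      exact any_startswith_eq_any_prefix (PySem.Str.upper postcode)
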